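-- pv_equiv track=rewrite | github.com/epicfacedood/tutor-ai-database | quick_organize_files.py | is_solution_file
-- ===== SOURCE A (Python) =====
-- def is_solution_file(filename):
--     """Check if a file is likely a solution file based on its name."""
--     solution_keywords = [
--         'solution', 'solutions', 'soln', 'solns', 'sol', 'sols',
--         'answer', 'answers', 'ans', 'anss',
--         'worked', 'worked example', 'worked examples',
--         'key', 'keys', 'answer key', 'answer keys'
--     ]
--
--     # Convert to lowercase for case-insensitive matching
--     lower_filename = filename.lower()
--
--     # Check for solution keywords
--     for keyword in solution_keywords:
--         if keyword in lower_filename: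
--             return True
--
--     return False
-- ===== SOURCE B (Python) =====
-- def is_solution_file(filename):
--     """Check if a file is likely a solution file based on its name."""
--     # Every keyword in A's list contains one of the four minimal stems
--     # ('sol', 'ans', 'worked', 'key'), and each stem is itself a keyword,
--     # so the answer is: does any stem start at some position of the name?
--     # Single left-to-right scan over positions, testing stems by prefix.
--     lf = filename.lower()
--     stems = ('sol', 'ans', 'worked', 'key')
--     for i in range(len(lf)):
--         for s in stems:
--             if lf.startswith(s, i):
--                 return True
--     return False
-- ===== Notes on version B (the rewrite author's own statement) =====
-- stated objective: alternative
-- what changed: Replaces the loop over 17 keywords, each tested as a substring of the lowercased name, by a single left-to-right position scan that tests at each index whether one of the 4 minimal stems (sol, ans, worked, key) starts there; every keyword contains a stem and each stem is itself a keyword, so the boolean is identical.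
import Mathlib
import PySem

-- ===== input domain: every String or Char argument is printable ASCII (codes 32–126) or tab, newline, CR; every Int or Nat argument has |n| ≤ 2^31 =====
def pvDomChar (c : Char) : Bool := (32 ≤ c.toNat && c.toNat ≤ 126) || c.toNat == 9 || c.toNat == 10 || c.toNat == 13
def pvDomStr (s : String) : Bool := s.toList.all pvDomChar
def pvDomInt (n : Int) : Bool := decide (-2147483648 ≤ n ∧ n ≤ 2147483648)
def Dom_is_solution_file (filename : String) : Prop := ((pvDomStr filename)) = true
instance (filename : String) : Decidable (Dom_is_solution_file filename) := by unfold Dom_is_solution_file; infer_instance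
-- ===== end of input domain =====

-- B replaces A's 17 substring scans by ONE left-to-right position scan testing the 4 minimal stems by prefix at each index (alternative).

-- ===== PORT A =====
def is_solution_file (filename : String) : Bool :=
  let solution_keywords : List String :=
    ["solution", "solutions", "soln", "solns", "sol", "sols",
     "answer", "answers", "ans", "anss",
     "worked", "worked example", "worked examples",
     "key", "keys", "answer key", "answer keys"]
  let lower_filename := PySem.Str.lower filename
  -- the for-loop with early 'return True' is List.any (same order, short-circuit)
  solution_keywords.any (fun keyword => PySem.Str.isIn keyword lower_filename)

-- ===== PORT B =====
-- Source B's inner 'for s in stems: if lf.startswith(s, i)' at position i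
def stemAt (t : List Char) : Bool :=
  "sol".toList.isPrefixOf t || "ans".toList.isPrefixOf t
    || "worked".toList.isPrefixOf t || "key".toList.isPrefixOf t

-- Source B's outer 'for i in range(len(lf))': walking the suffixes left to right = the positions 0..n-1
def scanStems : List Char → Bool
  | [] => false
  | c :: rest => stemAt (c :: rest) || scanStems rest

def is_solution_file_alt (filename : String) : Bool :=
  scanStems (PySem.Str.lower filename).toList

-- ===== PRECONDITION & SPEC =====
def Spec_is_solution_file (filename : String) (out : Bool) : Prop := out = is_solution_file_alt filename
instance (filename : String) (out : Bool) : Decidable (Spec_is_solution_file filename out) := by unfold Spec_is_solution_file; infer_instance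

-- ===== CLAIM =====
def Claim_equal_is_solution_file : Prop := ∀ (filename : String), Dom_is_solution_file filename → Spec_is_solution_file filename (is_solution_file filename)

-- ===== LEMMAS AND PROOFS =====

-- a stem that is infix of a keyword is infix of anything the keyword is infix of
theorem stem_infix {stem kw : List Char} {L : List Char}
    (hs : stem <:+: kw) (h : kw <:+: L) : stem <:+: L :=
  hs.trans h

-- the scan finds a stem iff some suffix starts with one
theorem scanStems_iff (L : List Char) :
    scanStems L = true ↔ ∃ t, t <:+ L ∧ stemAt t = true := by
  induction L with
  | nil =>
    constructor
    · intro h; simp [scanStems] at h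
    · rintro ⟨t, ht, hs⟩
      rw [List.suffix_nil.mp ht] at hs
      exact absurd hs (by decide)
  | cons c rest ih =>
    simp only [scanStems, Bool.or_eq_true, ih]
    constructor
    · rintro (h | ⟨t, hts, ht⟩)
      · exact ⟨c :: rest, List.suffix_refl _, h⟩
      · exact ⟨t, hts.trans (List.suffix_cons c rest), ht⟩
    · rintro ⟨t, hts, ht⟩
      rcases List.suffix_cons_iff.mp hts with h | h
      · subst h; exact Or.inl ht
      · exact Or.inr ⟨t, h, ht⟩

-- the scan decides exactly the 4-stem infix disjunction
theorem scanStems_eq_stems (L : List Char) :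
    scanStems L = true ↔
      ("sol".toList <:+: L ∨ "ans".toList <:+: L ∨
       "worked".toList <:+: L ∨ "key".toList <:+: L) := by
  rw [scanStems_iff]
  constructor
  · rintro ⟨t, hts, ht⟩
    simp only [stemAt, Bool.or_eq_true, List.isPrefixOf_iff_prefix] at ht
    rcases ht with ((h | h) | h) | h
    · exact Or.inl (List.infix_iff_prefix_suffix.mpr ⟨t, h, hts⟩)
    · exact Or.inr (Or.inl (List.infix_iff_prefix_suffix.mpr ⟨t, h, hts⟩))
    · exact Or.inr (Or.inr (Or.inl (List.infix_iff_prefix_suffix.mpr ⟨t, h, hts⟩)))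
    · exact Or.inr (Or.inr (Or.inr (List.infix_iff_prefix_suffix.mpr ⟨t, h, hts⟩)))
  · rintro (h | h | h | h) <;>
      rcases List.infix_iff_prefix_suffix.mp h with ⟨t, hp, hs⟩
    · exact ⟨t, hs, by
        simp only [stemAt, Bool.or_eq_true, List.isPrefixOf_iff_prefix]
        exact Or.inl (Or.inl (Or.inl hp))⟩
    · exact ⟨t, hs, by
        simp only [stemAt, Bool.or_eq_true, List.isPrefixOf_iff_prefix]
        exact Or.inl (Or.inl (Or.inr hp))⟩
    · exact ⟨t, hs, by
        simp only [stemAt, Bool.or_eq_true, List.isPrefixOf_iff_prefix]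
        exact Or.inl (Or.inr hp)⟩
    · exact ⟨t, hs, by
        simp only [stemAt, Bool.or_eq_true, List.isPrefixOf_iff_prefix]
        exact Or.inr hp⟩

-- ===== VERDICT =====
theorem is_solution_file_spec : Claim_equal_is_solution_file := by
  unfold Claim_equal_is_solution_file
  intro filename _
  unfold Spec_is_solution_file is_solution_file is_solution_file_alt
  simp only [List.any_cons, List.any_nil, Bool.or_false]
  rw [Bool.eq_iff_iff, scanStems_eq_stems]
  simp only [Bool.or_eq_true, PySem.Str.isIn_iff_infix]
  set L := (PySem.Str.lower filename).toList with hL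
  constructor
  · rintro (h|h|h|h|h|h|h|h|h|h|h|h|h|h|h|h|h)
    · exact Or.inl (stem_infix (stem := "sol".toList) (kw := "solution".toList) (by decide) h)
    · exact Or.inl (stem_infix (stem := "sol".toList) (kw := "solutions".toList) (by decide) h)
    · exact Or.inl (stem_infix (stem := "sol".toList) (kw := "soln".toList) (by decide) h)
    · exact Or.inl (stem_infix (stem := "sol".toList) (kw := "solns".toList) (by decide) h)
    · exact Or.inl h
    · exact Or.inl (stem_infix (stem := "sol".toList) (kw := "sols".toList) (by decide) h)
    · exact Or.inr (Or.inl (stem_infix (stem := "ans".toList) (kw := "answer".toList) (by decide) h))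
    · exact Or.inr (Or.inl (stem_infix (stem := "ans".toList) (kw := "answers".toList) (by decide) h))
    · exact Or.inr (Or.inl h)
    · exact Or.inr (Or.inl (stem_infix (stem := "ans".toList) (kw := "anss".toList) (by decide) h))
    · exact Or.inr (Or.inr (Or.inl h))
    · exact Or.inr (Or.inr (Or.inl (stem_infix (stem := "worked".toList) (kw := "worked example".toList) (by decide) h)))
    · exact Or.inr (Or.inr (Or.inl (stem_infix (stem := "worked".toList) (kw := "worked examples".toList) (by decide) h)))
    · exact Or.inr (Or.inr (Or.inr h))
    · exact Or.inr (Or.inr (Or.inr (stem_infix (stem := "key".toList) (kw := "keys".toList) (by decide) h)))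
    · exact Or.inr (Or.inr (Or.inr (stem_infix (stem := "key".toList) (kw := "answer key".toList) (by decide) h)))
    · exact Or.inr (Or.inr (Or.inr (stem_infix (stem := "key".toList) (kw := "answer keys".toList) (by decide) h)))
  · rintro (h|h|h|h)
    · exact Or.inr (Or.inr (Or.inr (Or.inr (Or.inl h))))
    · exact Or.inr (Or.inr (Or.inr (Or.inr (Or.inr (Or.inr (Or.inr (Or.inr (Or.inl h))))))))
    · exact Or.inr (Or.inr (Or.inr (Or.inr (Or.inr (Or.inr (Or.inr (Or.inr (Or.inr (Or.inr (Or.inl h))))))))))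
    · exact Or.inr (Or.inr (Or.inr (Or.inr (Or.inr (Or.inr (Or.inr (Or.inr (Or.inr (Or.inr (Or.inr (Or.inr (Or.inr (Or.inl h)))))))))))))
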